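-- pv_equiv track=rewrite | github.com/13272719148/My_internship_in_Bingyan | Clisock.py | check
-- ===== SOURCE A (Python) =====
-- def check(data_b):                                                        #定义奇偶检测函数
--     nums_of_ones = 0                                                      #设置二进制数据中“1”的计数器
--     for i in data_b:                                                      #对于数据中的每一个对象
--         i_b = bin(i)                                                      #用新变量将其转化为二进制来处理
--         for bit,nums in enumerate(i_b):                                   #对i_b进行enumerate迭代
--             if nums == "1":                                               #如果某一位的数字为1
--                 nums_of_ones += 1                                         #计数器加1
--     if nums_of_ones % 2 == 1:                                             #如果计数器为奇数
--         return True                                                       #返回True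
--     else:                                                                 #反之
--         return False                                                      #返回False
-- ===== SOURCE B (Python) =====
-- def check(data_b):
--     acc = 0
--     for i in data_b:
--         acc ^= abs(i)
--     return acc.bit_count() % 2 == 1
-- ===== Notes on version B (the rewrite author's own statement) =====
-- stated objective: simpler
-- what changed: A counts '1' characters of bin(i) for every element with nested loops; B folds the list into a single integer by XOR of absolute values and takes the popcount parity of that one value (total bit parity is XOR-invariant).
import Mathlib
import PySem

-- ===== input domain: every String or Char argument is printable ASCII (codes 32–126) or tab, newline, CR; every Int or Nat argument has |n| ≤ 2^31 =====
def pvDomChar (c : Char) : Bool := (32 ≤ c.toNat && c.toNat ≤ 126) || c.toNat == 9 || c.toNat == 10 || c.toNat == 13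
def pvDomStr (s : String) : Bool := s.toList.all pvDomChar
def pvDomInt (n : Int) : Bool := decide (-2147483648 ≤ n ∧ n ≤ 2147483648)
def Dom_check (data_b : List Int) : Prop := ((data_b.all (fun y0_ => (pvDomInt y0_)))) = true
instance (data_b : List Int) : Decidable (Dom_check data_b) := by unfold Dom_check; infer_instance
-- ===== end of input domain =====

-- B replaces A's nested bit-string counting by a single XOR fold of absolute values
-- followed by one popcount-parity test (simpler: total bit parity is XOR-invariant).


-- ===== PORT A =====
-- binary digits of a positive natural, most significant first (the digit part of Python's bin)
def binDigits : Nat → List Char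
  | 0 => []
  | n+1 => binDigits ((n+1) / 2) ++ [if (n+1) % 2 = 1 then '1' else '0']
decreasing_by exact Nat.div_lt_self (Nat.succ_pos n) (by omega)

-- Python's bin(i) as a list of characters: optional '-', then "0b", then the digits ("0" for zero)
def pyBin (i : Int) : List Char :=
  (if i < 0 then ['-'] else []) ++ ['0', 'b'] ++
    (if i = 0 then ['0'] else binDigits i.natAbs)

def check (data_b : List Int) : Bool :=
  let numsOfOnes :=
    data_b.foldl
      (fun acc i => (pyBin i).foldl (fun a c => if c = '1' then a + 1 else a) acc) 0
  if numsOfOnes % 2 = 1 then true else false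

-- ===== PORT B =====
def check_alt (data_b : List Int) : Bool :=
  let acc := data_b.foldl (fun (a : Nat) i => a ^^^ i.natAbs) 0
  decide (PySem.Int.bitCount (acc : Int) % 2 = 1)

-- ===== PRECONDITION & SPEC =====
def Spec_check (data_b : List Int) (out : Bool) : Prop := out = check_alt data_b
instance (data_b : List Int) (out : Bool) : Decidable (Spec_check data_b out) := by unfold Spec_check; infer_instance

-- ===== CLAIM (what is proved, stated in full; the proofs are below) =====
def Claim_equal_check : Prop := ∀ (data_b : List Int), Dom_check data_b → Spec_check data_b (check data_b)

-- ===== LEMMAS AND PROOFS =====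

-- counting '1' characters with A's inner fold, from an arbitrary accumulator
theorem foldl_ones_eq (cs : List Char) (a : Nat) :
    cs.foldl (fun a c => if c = '1' then a + 1 else a) a = a + cs.count '1' := by
  induction cs generalizing a with
  | nil => simp
  | cons c cs ih =>
    by_cases h : c = '1' <;> simp [List.foldl, h, ih] <;> omega

theorem count_binDigits (n : Nat) :
    (binDigits n).count '1' = PySem.Int.bitCount (n : Int) := by
  induction n using Nat.strong_induction_on with
  | _ n ih =>
    match n with
    | 0 => simp [binDigits]
    | m+1 =>
      rw [binDigits, List.count_append,
        ih ((m+1)/2) (Nat.div_lt_self (Nat.succ_pos m) (by omega)),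
        PySem.Int.bitCount_natCast (Nat.succ_pos m)]
      by_cases h : (m+1) % 2 = 1 <;> simp [h] <;> omega

theorem bitCount_abs (i : Int) :
    PySem.Int.bitCount |i| = PySem.Int.bitCount i := by
  by_cases h : 0 ≤ i
  · rw [abs_of_nonneg h]
  · rw [abs_of_neg (by omega), PySem.Int.bitCount_neg]

theorem count_pyBin (i : Int) :
    (pyBin i).count '1' = PySem.Int.bitCount i := by
  unfold pyBin
  by_cases h0 : i = 0
  · simp [h0]
  · by_cases hneg : i < 0
    · simp [hneg, h0, count_binDigits, bitCount_abs]
    · simp [hneg, h0, count_binDigits, bitCount_abs]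

-- parity of the bit count of a Nat XOR is the parity of the sum of bit counts
theorem bitCount_xor_parity (a b : Nat) :
    PySem.Int.bitCount ((a ^^^ b : Nat) : Int) % 2
      = (PySem.Int.bitCount (a : Int) + PySem.Int.bitCount (b : Int)) % 2 := by
  induction a using Nat.strong_induction_on generalizing b with
  | _ a ih =>
    match a, b with
    | 0, b => simp
    | m+1, b =>
      by_cases hb : b = 0
      · subst hb; simp
      · by_cases hx : (m+1) ^^^ b = 0
        · have hbm : m + 1 = b := by
            have := Nat.xor_eq_zero_iff.mp hx; omega
          subst hbm
          simp only [Nat.xor_self, Nat.cast_zero]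
          have h0 : PySem.Int.bitCount 0 = 0 := by decide
          omega
        · rw [PySem.Int.bitCount_natCast (Nat.pos_of_ne_zero hx),
            PySem.Int.bitCount_natCast (Nat.succ_pos m),
            PySem.Int.bitCount_natCast (Nat.pos_of_ne_zero hb),
            Nat.xor_div_two]
          have hrec := ih ((m+1)/2) (Nat.div_lt_self (Nat.succ_pos m) (by omega)) (b/2)
          have hm2 : ((m+1) ^^^ b) % 2 = ((m+1) % 2 + b % 2) % 2 := by simp
          simp only [Nat.succ_eq_add_one] at hrec ⊢
          omega

-- the loop invariant: A's running count and B's running XOR agree modulo 2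
theorem fold_parity (l : List Int) (cnt : Nat) (acc : Nat) :
    cnt % 2 = PySem.Int.bitCount (acc : Int) % 2 →
    (l.foldl (fun a i => (pyBin i).foldl (fun a c => if c = '1' then a + 1 else a) a) cnt) % 2
      = PySem.Int.bitCount ((l.foldl (fun (a : Nat) i => a ^^^ i.natAbs) acc : Nat) : Int) % 2 := by
  induction l generalizing cnt acc with
  | nil => intro h; simpa using h
  | cons x xs ih =>
    intro h
    simp only [List.foldl]
    apply ih
    rw [foldl_ones_eq, count_pyBin, bitCount_xor_parity]
    have habs : ((x.natAbs : Nat) : Int) = |x| := (Int.abs_eq_natAbs x).symm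
    rw [habs, bitCount_abs]
    omega

-- ===== VERDICT (by name: the statement is the Claim_ definition above) =====
theorem check_spec : Claim_equal_check := by
  intro data_b _
  unfold Spec_check check check_alt
  have h := fold_parity data_b 0 0 (by simp)
  simp only [] at h ⊢
  rw [h]
  by_cases hp : PySem.Int.bitCount ((data_b.foldl (fun (a : Nat) i => a ^^^ i.natAbs) 0 : Nat) : Int) % 2 = 1 <;>
    simp [hp]
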